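-- pv_equiv track=rewrite | github.com/romangspb/xbox-dns-tracker | src/parsers/telegram.py | _extract_dns_pairs
-- ===== SOURCE A (Python) =====
-- def _extract_dns_pairs(ipv4_list: list[str]) -> list[tuple[str, str | None]]:
--     """Группирует IP в пары (primary, secondary).
--     Логика: берём IP попарно. Если нечётное количество — последний без пары."""
--     pairs = []
--     i = 0
--     while i < len(ipv4_list):
--         primary = ipv4_list[i]
--         secondary = ipv4_list[i + 1] if i + 1 < len(ipv4_list) else None
--         pairs.append((primary, secondary))
--         i += 2
--     return pairs
-- ===== SOURCE B (Python) =====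
-- def _extract_dns_pairs(ipv4_list: list[str]) -> list[tuple[str, str | None]]:
--     """Slice-and-zip: split into even/odd-position slices and zip them, padding the leftover."""
--     evens = ipv4_list[::2]
--     odds = ipv4_list[1::2]
--     pairs = list(zip(evens, odds))
--     if len(odds) < len(evens):
--         pairs.append((evens[-1], None))
--     return pairs
-- ===== Notes on version B (the rewrite author's own statement) =====
-- stated objective: alternative
-- what changed: Replaced the indexed while-loop with explicit bounds checks by a two-pass slice-and-zip: take the even- and odd-position slices, zip them, and pad the unpaired last element.
import Mathlib
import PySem

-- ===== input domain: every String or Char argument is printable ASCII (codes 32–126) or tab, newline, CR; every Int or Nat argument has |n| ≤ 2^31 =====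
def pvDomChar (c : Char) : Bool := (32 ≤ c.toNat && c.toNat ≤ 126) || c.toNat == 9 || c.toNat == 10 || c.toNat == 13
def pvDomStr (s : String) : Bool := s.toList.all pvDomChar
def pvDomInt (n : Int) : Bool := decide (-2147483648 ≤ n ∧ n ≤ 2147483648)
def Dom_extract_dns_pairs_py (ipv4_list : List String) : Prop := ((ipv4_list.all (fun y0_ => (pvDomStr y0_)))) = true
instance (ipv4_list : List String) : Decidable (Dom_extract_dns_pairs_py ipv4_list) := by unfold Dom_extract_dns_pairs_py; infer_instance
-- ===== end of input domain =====

-- B replaces A's indexed while-loop by a two-pass slice-and-zip (even/odd-position slices, zip, pad the leftover).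

-- ===== PORT A =====
-- while i < len(ipv4_list): primary = xs[i]; secondary = xs[i+1] if i+1 < len else None; append; i += 2
def extractDnsPairsLoop (xs : List String) (i : Nat) (pairs : List (String × Option String)) :
    List (String × Option String) :=
  if h : i < xs.length then
    let primary := xs[i]
    let secondary : Option String := if h2 : i + 1 < xs.length then some xs[i+1] else none
    extractDnsPairsLoop xs (i + 2) (pairs ++ [(primary, secondary)])
  else pairs
termination_by xs.length - i

def extract_dns_pairs_py (ipv4_list : List String) : List (String × Option String) :=
  extractDnsPairsLoop ipv4_list 0 []

-- ===== PORT B =====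
-- hand port of the step-2 slice xs[::2] (PySem.List.slice has no step argument); exact: every other element starting at index 0
def everyOtherPy : List String → List String
  | [] => []
  | [x] => [x]
  | x :: _ :: rest => x :: everyOtherPy rest

def extract_dns_pairs_py_alt (ipv4_list : List String) : List (String × Option String) :=
  let evens := everyOtherPy ipv4_list                       -- ipv4_list[::2]
  let odds := everyOtherPy (ipv4_list.drop 1)               -- ipv4_list[1::2]
  let pairs := (evens.zip odds).map (fun p => (p.1, some p.2))   -- list(zip(evens, odds))
  if odds.length < evens.length then
    match PySem.List.pyGet? evens (-1) with                 -- evens[-1] (always in range here)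
    | some e => pairs ++ [(e, none)]
    | none => pairs
  else pairs

-- ===== PRECONDITION & SPEC =====
def Spec_extract_dns_pairs_py (ipv4_list : List String) (out : List (String × Option String)) : Prop := out = extract_dns_pairs_py_alt ipv4_list
instance (ipv4_list : List String) (out : List (String × Option String)) : Decidable (Spec_extract_dns_pairs_py ipv4_list out) := by unfold Spec_extract_dns_pairs_py; infer_instance

-- ===== CLAIM (what is proved, stated in full; the proofs are below) =====
def Claim_equal_extract_dns_pairs_py : Prop := ∀ (ipv4_list : List String), Dom_extract_dns_pairs_py ipv4_list → Spec_extract_dns_pairs_py ipv4_list (extract_dns_pairs_py ipv4_list)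

-- ===== LEMMAS AND PROOFS =====
-- Common characterisation of both programs: pair off the list two at a time.
def pairRec : List String → List (String × Option String)
  | [] => []
  | [x] => [(x, none)]
  | x :: y :: rest => (x, some y) :: pairRec rest

-- Invariant of A's loop: from index i it appends the pairing of the remaining suffix.
theorem extractDnsPairsLoop_eq (xs : List String) (i : Nat) (pairs : List (String × Option String)) :
    extractDnsPairsLoop xs i pairs = pairs ++ pairRec (xs.drop i) := by
  rw [extractDnsPairsLoop]
  split
  · next h =>
    rw [extractDnsPairsLoop_eq xs (i + 2), List.append_assoc]
    congr 1
    have hdrop : xs.drop i = xs[i] :: xs.drop (i + 1) := List.drop_eq_getElem_cons h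
    by_cases h2 : i + 1 < xs.length
    · have hdrop2 : xs.drop (i + 1) = xs[i+1] :: xs.drop (i + 2) := List.drop_eq_getElem_cons h2
      rw [hdrop, hdrop2]
      simp [pairRec, h2]
    · have hnil : xs.drop (i + 1) = [] := by rw [List.drop_eq_nil_iff]; omega
      have hnil2 : xs.drop (i + 2) = [] := by rw [List.drop_eq_nil_iff]; omega
      rw [hdrop, hnil]
      simp [pairRec, h2, hnil2]
  · next h =>
    have : xs.drop i = [] := by rw [List.drop_eq_nil_iff]; omega
    simp [this, pairRec]
termination_by xs.length - i

-- B's slice-and-zip also computes pairRec (two-step induction on the list).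
theorem alt_eq_pairRec : (xs : List String) → extract_dns_pairs_py_alt xs = pairRec xs
  | [] => by simp [extract_dns_pairs_py_alt, everyOtherPy, pairRec]
  | [x] => by simp [extract_dns_pairs_py_alt, everyOtherPy, pairRec, PySem.List.pyGet?_neg_one]
  | x :: y :: rest => by
    have ih := alt_eq_pairRec rest
    have hodds : everyOtherPy ((x :: y :: rest).drop 1) = y :: everyOtherPy (rest.drop 1) := by
      match rest with
      | [] => simp [everyOtherPy]
      | r :: rs => simp [everyOtherPy]
    simp only [extract_dns_pairs_py_alt, everyOtherPy, hodds] at *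
    simp only [List.zip_cons_cons, List.map_cons, List.length_cons, PySem.List.pyGet?_neg_one]
    by_cases hlt : (everyOtherPy (rest.drop 1)).length < (everyOtherPy rest).length
    · have hne : everyOtherPy rest ≠ [] := by
        intro hnil; rw [hnil] at hlt; simp at hlt
      have hlast : (x :: everyOtherPy rest).getLast? = (everyOtherPy rest).getLast? := by
        match h : everyOtherPy rest with
        | [] => exact absurd h hne
        | a :: as => simp [List.getLast?_cons_cons]
      simp only [hlast]
      have hlt1 : (everyOtherPy (rest.drop 1)).length + 1 < (everyOtherPy rest).length + 1 := by omega
      simp only [if_pos hlt1, if_pos hlt, PySem.List.pyGet?_neg_one] at *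
      match hg : (everyOtherPy rest).getLast? with
      | some e => rw [pairRec, ← ih, hg]; simp
      | none => rw [pairRec, ← ih, hg]
    · have : ¬ ((everyOtherPy (rest.drop 1)).length + 1 < (everyOtherPy rest).length + 1) := by omega
      simp only [if_neg this, if_neg hlt, PySem.List.pyGet?_neg_one] at *
      rw [pairRec, ← ih]

-- ===== VERDICT (by name: the statement is the Claim_ definition above) =====
theorem extract_dns_pairs_py_spec : Claim_equal_extract_dns_pairs_py := by
  intro xs _
  unfold Spec_extract_dns_pairs_py extract_dns_pairs_py
  rw [extractDnsPairsLoop_eq, alt_eq_pairRec]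
  simp
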